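-- pv_equiv track=rewrite | github.com/JakubMlocek/Introduction_to_Computer_Science | Cwiczenia6/zad5.py | pociecie
-- ===== SOURCE A (Python) =====
-- def czypierwsza(liczba):
--     if liczba < 2:
--         return False
--     i = 2
--     while i*i <= liczba:
--         if liczba % i == 0:
--             return False
--         i += 1
--     return True
--
-- def bin2dec(bin):
--     pot = 1
--     wynik = 0
--     i = len(bin) - 1
--     while i >= 0:
--         wynik = wynik + bin[i] * pot
--         pot *= 2
--         i -= 1
--     return wynik
--
-- def pociecie(T):
--     if czypierwsza(bin2dec(T)):
--         return True
--     else: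
--         for i in range(2,len(T)):
--             if czypierwsza(bin2dec(T[:i])):
--                 return pociecie(T[i:])
--         return False
-- ===== SOURCE B (Python) =====
-- def _is_prime(n):
--     if n < 2:
--         return False
--     if n % 2 == 0:
--         return n == 2
--     d = 3
--     while d * d <= n:
--         if n % d == 0:
--             return False
--         d += 2
--     return True
--
-- def _value(bits):
--     v = 0
--     for b in bits:
--         v = v * 2 + b
--     return v
--
-- def pociecie(T):
--     while True:
--         if _is_prime(_value(T)):
--             return True
--         cut = None
--         for i in range(2, len(T)):
--             if _is_prime(_value(T[:i])):
--                 cut = i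
--                 break
--         if cut is None:
--             return False
--         T = T[cut:]
-- ===== Notes on version B (the rewrite author's own statement) =====
-- stated objective: alternative
-- what changed: Tail recursion on the suffix is replaced by an explicit while-loop that commits to the first prime prefix and reassigns T; bin2dec's power-table scan from the right is replaced by a left-to-right Horner fold; trial division is replaced by a 2-then-odd-divisors check.
import Mathlib
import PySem

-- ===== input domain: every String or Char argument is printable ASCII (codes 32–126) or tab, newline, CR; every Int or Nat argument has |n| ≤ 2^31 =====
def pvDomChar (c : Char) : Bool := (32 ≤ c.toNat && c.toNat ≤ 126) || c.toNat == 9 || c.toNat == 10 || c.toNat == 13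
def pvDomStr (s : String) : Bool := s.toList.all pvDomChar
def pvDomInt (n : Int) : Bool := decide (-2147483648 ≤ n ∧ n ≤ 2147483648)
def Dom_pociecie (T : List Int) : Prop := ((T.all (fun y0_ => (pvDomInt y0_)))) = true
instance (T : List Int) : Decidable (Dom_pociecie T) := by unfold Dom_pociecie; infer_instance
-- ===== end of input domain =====

-- B replaces A's tail recursion on the suffix by an explicit loop committing to the first prime
-- prefix, a Horner fold instead of the power-table scan, and a 2-then-odd-divisors prime test
-- (objective: alternative decomposition, same asymptotic cost).

-- ===== PORT A =====
-- while i*i <= liczba: trial division loop of czypierwsza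
def czyLoop (liczba i : Int) : Bool :=
  if i * i ≤ liczba then
    if PySem.Int.mod liczba i == 0 then false
    else czyLoop liczba (i + 1)
  else true
termination_by (liczba + 2 - i).toNat
decreasing_by
  rename_i h _
  have hi : i ≤ liczba + 1 := by
    by_cases h1 : i ≤ 1
    · nlinarith
    · nlinarith
  omega

def czypierwsza (liczba : Int) : Bool :=
  if liczba < 2 then false else czyLoop liczba 2

-- while i >= 0 loop of bin2dec; bin[i] is in range on every iteration A reaches, ported as pyGetD
def bin2decLoop (bin : List Int) (pot wynik i : Int) : Int :=
  if 0 ≤ i then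
    bin2decLoop bin (pot * 2) (wynik + PySem.List.pyGetD bin i 0 * pot) (i - 1)
  else wynik
termination_by (i + 1).toNat
decreasing_by omega

def bin2dec (bin : List Int) : Int :=
  bin2decLoop bin 1 0 ((bin.length : Int) - 1)

-- the for-loop returns at the FIRST i with a prime prefix: ported as find? over range(2, len(T))
def pociecie (T : List Int) : Bool :=
  if czypierwsza (bin2dec T) then true
  else
    match h : (PySem.List.pyRange 2 (T.length : Int) 1).find?
        (fun i => czypierwsza (bin2dec (PySem.List.slice T none (some i)))) with
    | some i => pociecie (PySem.List.slice T (some i) none)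
    | none => false
termination_by T.length
decreasing_by
  have hm := List.mem_of_find?_eq_some h
  rw [PySem.List.mem_pyRange_one] at hm
  have h0 : (0:Int) ≤ i := by omega
  rw [PySem.List.slice_from T h0]
  have : 1 ≤ i.toNat ∧ i.toNat < T.length := by omega
  simp [List.length_drop]; omega

-- ===== PORT B =====
-- _is_prime's odd-divisor loop (d = 3, 5, 7, …)
def pvIsPrimeLoop (n d : Int) : Bool :=
  if d * d ≤ n then
    if PySem.Int.mod n d == 0 then false
    else pvIsPrimeLoop n (d + 2)
  else true
termination_by (n + 3 - d).toNat
decreasing_by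
  rename_i h _
  have hd : d ≤ n + 2 := by
    by_cases h1 : d ≤ 1
    · nlinarith
    · nlinarith
  omega

def pvIsPrime (n : Int) : Bool :=
  if n < 2 then false
  else if PySem.Int.mod n 2 == 0 then n == 2
  else pvIsPrimeLoop n 3

-- _value: Horner fold over the bits
def pvValue (bits : List Int) : Int := bits.foldl (fun v b => v * 2 + b) 0

-- the inner for-loop with break: first cut index with a prime prefix value
def pvFindCut (T : List Int) : Option Nat :=
  (List.range' 2 (T.length - 2)).find? (fun i => pvIsPrime (pvValue (T.take i)))

def pociecie_alt (T : List Int) : Bool :=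
  if pvIsPrime (pvValue T) then true
  else
    match h : pvFindCut T with
    | some cut => pociecie_alt (T.drop cut)
    | none => false
termination_by T.length
decreasing_by
  have hm := List.mem_of_find?_eq_some h
  rw [List.mem_range'] at hm
  obtain ⟨j, hj, rfl⟩ := hm
  simp [List.length_drop]; omega

-- ===== PRECONDITION & SPEC =====
def Spec_pociecie (T : List Int) (out : Bool) : Prop := out = pociecie_alt T
instance (T : List Int) (out : Bool) : Decidable (Spec_pociecie T out) := by unfold Spec_pociecie; infer_instance

-- ===== CLAIM (what is proved, stated in full; the proofs are below) =====
def Claim_equal_pociecie : Prop := ∀ (T : List Int), Dom_pociecie T → Spec_pociecie T (pociecie T)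

-- ===== LEMMAS AND PROOFS =====

-- A's trial-division loop succeeds iff no divisor ≥ i in the tested window divides liczba
theorem czyLoop_iff (liczba i : Int) : 1 ≤ i →
    (czyLoop liczba i = true ↔
      ∀ d : Int, i ≤ d → d * d ≤ liczba → PySem.Int.mod liczba d ≠ 0) := by
  fun_induction czyLoop liczba i with
  | case1 i hle hmod =>
    intro hi
    simp only [Bool.false_eq_true, false_iff, not_forall]
    exact ⟨i, le_rfl, hle, by simpa using hmod⟩
  | case2 i hle hmod ih =>
    intro hi
    rw [show czyLoop liczba (i+1) = true ↔ _ from ih (by omega)]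
    constructor
    · intro H d hd hdd
      by_cases hdi : d = i
      · subst hdi; simpa using hmod
      · exact H d (by omega) hdd
    · intro H d hd hdd
      exact H d (by omega) hdd
  | case3 i hle =>
    intro hi
    simp only [true_iff]
    intro d hd hdd
    nlinarith

-- B's odd loop succeeds iff no odd divisor ≥ d in the window divides n
theorem pvIsPrimeLoop_iff (n d : Int) : 1 ≤ d → d % 2 = 1 →
    (pvIsPrimeLoop n d = true ↔
      ∀ e : Int, d ≤ e → e % 2 = 1 → e * e ≤ n → PySem.Int.mod n e ≠ 0) := by
  fun_induction pvIsPrimeLoop n d with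
  | case1 d hle hmod =>
    intro hd hodd
    simp only [Bool.false_eq_true, false_iff, not_forall]
    exact ⟨d, le_rfl, hodd, hle, by simpa using hmod⟩
  | case2 d hle hmod ih =>
    intro hd hodd
    rw [show pvIsPrimeLoop n (d+2) = true ↔ _ from ih (by omega) (by omega)]
    constructor
    · intro H e he heodd hee
      by_cases hde : e = d
      · subst hde; simpa using hmod
      · exact H e (by omega) heodd hee
    · intro H e he heodd hee
      exact H e (by omega) heodd hee
  | case3 d hle =>
    intro hd hodd
    simp only [true_iff]
    intro e he heodd hee
    nlinarith

theorem prime_agree (n : Int) : czypierwsza n = pvIsPrime n := by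
  unfold czypierwsza pvIsPrime
  by_cases h2 : n < 2
  · simp [h2]
  · simp only [h2, if_false]
    rw [not_lt] at h2
    by_cases he : PySem.Int.mod n 2 = 0
    · have hdvd : (2:Int) ∣ n := (PySem.Int.mod_eq_zero_iff_dvd n 2).mp he
      simp only [he, beq_self_eq_true, if_pos]
      by_cases hn2 : n = 2
      · subst hn2
        simp only [beq_self_eq_true]
        rw [show czyLoop 2 2 = true ↔ _ from czyLoop_iff 2 2 (by norm_num)]
        intro d hd hdd; nlinarith
      · have hbe : (n == 2) = false := by simp [hn2]
        rw [hbe, ← Bool.not_eq_true, czyLoop_iff n 2 (by norm_num)]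
        intro H
        exact H 2 le_rfl (by omega) he
    · have hb : (PySem.Int.mod n 2 == 0) = false := by
        simp only [beq_eq_false_iff_ne, ne_eq]; exact he
      rw [hb]; simp only [Bool.false_eq_true, if_false]
      have hmod2 : n % 2 = 1 := by
        rw [PySem.Int.mod_eq_emod_of_pos (by norm_num : (0:Int) < 2)] at he
        omega
      rw [Bool.eq_iff_iff]
      rw [czyLoop_iff n 2 (by norm_num), pvIsPrimeLoop_iff n 3 (by norm_num) (by norm_num)]
      constructor
      · intro H e he3 heodd hee
        exact H e (by omega) hee
      · intro H d hd hdd hmodd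
        have hdvd : d ∣ n := (PySem.Int.mod_eq_zero_iff_dvd n d).mp hmodd
        by_cases hdo : d % 2 = 0
        · have : (2:Int) ∣ n := dvd_trans (by omega) hdvd
          omega
        · exact H d (by omega) (by omega) hdd hmodd

theorem pvValue_concat (l : List Int) (b : Int) :
    pvValue (l ++ [b]) = pvValue l * 2 + b := by
  simp [pvValue, List.foldl_append]

theorem bin2decLoop_spec (bin : List Int) (pot wynik i : Int) (hlt : i < (bin.length : Int)) :
    bin2decLoop bin pot wynik i = wynik + pot * pvValue (bin.take (i + 1).toNat) := by
  fun_induction bin2decLoop bin pot wynik i with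
  | case1 pot wynik i h0 ih =>
    have hlen : i.toNat < bin.length := by omega
    rw [ih (by omega)]
    have h1 : (i - 1 + 1).toNat = i.toNat := by omega
    have h2 : (i + 1).toNat = i.toNat + 1 := by omega
    rw [h1, h2, List.take_add_one]
    rw [List.getElem?_eq_getElem hlen]
    simp only [Option.toList_some]
    rw [pvValue_concat]
    rw [PySem.List.pyGetD_eq_getElem bin 0 h0 (by omega)]
    ring
  | case2 pot wynik i h0 =>
    have : (i + 1).toNat = 0 := by omega
    simp [this, pvValue]

theorem value_agree (bin : List Int) : bin2dec bin = pvValue bin := by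
  unfold bin2dec
  rw [bin2decLoop_spec bin 1 0 _ (by omega)]
  have h : ((bin.length : Int) - 1 + 1).toNat = bin.length := by omega
  rw [h]
  simp

theorem find_agree (T : List Int) :
    (PySem.List.pyRange 2 (T.length : Int) 1).find?
        (fun i => czypierwsza (bin2dec (PySem.List.slice T none (some i))))
      = Option.map (fun c : Nat => (c : Int)) (pvFindCut T) := by
  have hm : ((T.length : Int) - 2).toNat = T.length - 2 := by omega
  have hr : PySem.List.pyRange 2 (T.length : Int) 1
      = (List.range (T.length - 2)).map (fun k : Nat => 2 + (k : Int)) := by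
    rw [PySem.List.pyRange_one, hm]
  rw [hr]
  unfold pvFindCut
  rw [List.range'_eq_map_range, List.find?_map, List.find?_map]
  have hpred : ((fun i => czypierwsza (bin2dec (PySem.List.slice T none (some i)))) ∘
        (fun k : Nat => 2 + (k : Int)))
      = ((fun i => pvIsPrime (pvValue (T.take i))) ∘ (fun x : Nat => 2 + x)) := by
    funext k
    simp only [Function.comp_apply]
    have hc : (2 + (k : Int)) = ((2 + k : Nat) : Int) := by push_cast; ring
    rw [hc, PySem.List.slice_to_natCast, prime_agree, value_agree]
  rw [hpred]
  cases (List.range (T.length - 2)).find? ((fun i => pvIsPrime (pvValue (T.take i))) ∘ (fun x : Nat => 2 + x)) with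
  | none => rfl
  | some k => simp only [Option.map_some, Option.some.injEq]; push_cast; ring

theorem main_agree_aux : ∀ (n : Nat) (T : List Int), T.length = n → pociecie T = pociecie_alt T := by
  intro n
  induction n using Nat.strong_induction_on with
  | _ n ih =>
    intro T hT
    rw [pociecie, pociecie_alt]
    have hc : czypierwsza (bin2dec T) = pvIsPrime (pvValue T) := by
      rw [prime_agree, value_agree]
    rw [hc]
    by_cases hp : pvIsPrime (pvValue T) = true
    · simp [hp]
    · simp only [Bool.not_eq_true] at hp
      simp only [hp, Bool.false_eq_true, if_false]
      have hf := find_agree T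
      split
      · rename_i i heq
        rw [heq] at hf
        cases hq : pvFindCut T with
        | none => rw [hq] at hf; simp at hf
        | some cut =>
          rw [hq] at hf
          simp only [Option.map_some, Option.some.injEq] at hf
          have hmem := List.mem_of_find?_eq_some hq
          rw [List.mem_range'] at hmem
          obtain ⟨j, hj, hcut⟩ := hmem
          have h0 : (0:Int) ≤ i := by omega
          rw [PySem.List.slice_from T h0]
          have htn : i.toNat = cut := by omega
          rw [htn]
          split
          · rename_i cut2 heq2
            have hcc : cut = cut2 := Option.some.inj heq2
            subst hcc
            exact ih _ (by simp [List.length_drop]; omega) _ rfl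
          · rename_i heq2
            simp at heq2
      · rename_i heq
        rw [heq] at hf
        cases hq : pvFindCut T with
        | none =>
          split
          · rename_i cut2 heq2
            simp at heq2
          · rfl
        | some cut => rw [hq] at hf; simp at hf

theorem main_agree (T : List Int) : pociecie T = pociecie_alt T :=
  main_agree_aux T.length T rfl

-- ===== VERDICT (by name: the statement is the Claim_ definition above) =====
theorem pociecie_spec : Claim_equal_pociecie := by
  intro T _
  unfold Spec_pociecie
  exact main_agree T
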